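-- pv_equiv track=rewrite | github.com/elailai94/Algorithms | computeregex/compute_regex.py | compute_regex
-- ===== SOURCE A (Python) =====
-- import math
--
-- def concat(x, y):
--     return x + y
--
-- def compute_regex(n, k):
--     if k == 0:
--         return n * "0"
--     elif n == k:
--         return n * "1"
--     elif n < k:
--         return ""
--     else:
--         left_subregex_n = int(math.floor(n / 2.0))
--         right_subregex_n = int(math.ceil(n / 2.0))
--         ret_regex = ""
--         num_of_subregexes = 0
--
--         for i in range(k + 1):
--             left_subregex = compute_regex(left_subregex_n, i)
--             right_subregex = compute_regex(right_subregex_n, k - i)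
--
--             if left_subregex != "" and right_subregex != "":
--                 merged_regex = concat(left_subregex, right_subregex)
--
--                 if num_of_subregexes > 0:
--                     merged_regex = concat("+", merged_regex)
--
--                 ret_regex = concat(ret_regex, merged_regex)
--                 num_of_subregexes += 1
--
--         if num_of_subregexes > 1:
--             ret_regex = concat("(", ret_regex)
--             ret_regex = concat(ret_regex, ")")
--
--         return ret_regex
-- ===== SOURCE B (Python) =====
-- # B: row recursion on the size only: row(m) computes [compute_regex(m, j) for j in 0..k]
-- # from the two child rows, instead of A's (k+1)-way branching recursion on (n, k);
-- # parts are joined with "+".join.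
-- def compute_regex(n, k):
--     if k == 0:
--         return n * "0"
--     if n == k:
--         return n * "1"
--     if n < k or k < 0:
--         return ""
--
--     def row(m):
--         # row(m)[j] == compute_regex(m, j) for j in range(k + 1)
--         if m <= 1:
--             return ["0" * m if j == 0 else "1" * m if j == m else "" for j in range(k + 1)]
--         L, R = row(m // 2), row((m + 1) // 2)
--         out = []
--         for j in range(k + 1):
--             if j == 0:
--                 out.append("0" * m)
--             elif j == m:
--                 out.append("1" * m)
--             elif j > m:
--                 out.append("")
--             else:
--                 parts = [L[i] + R[j - i] for i in range(j + 1) if L[i] and R[j - i]]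
--                 s = "+".join(parts)
--                 out.append("(" + s + ")" if len(parts) > 1 else s)
--         return out
--
--     return row(n)[k]
-- ===== Notes on version B (the rewrite author's own statement) =====
-- stated objective: alternative
-- what changed: Replaces A's (k+1)-way branching recursion on (n,k) with a row recursion on the size only: row(m) builds the whole list [regex(m,j) for j=0..k] from the two child rows and joins the parts with '+'.join instead of A's accumulator loop.
import Mathlib
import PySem

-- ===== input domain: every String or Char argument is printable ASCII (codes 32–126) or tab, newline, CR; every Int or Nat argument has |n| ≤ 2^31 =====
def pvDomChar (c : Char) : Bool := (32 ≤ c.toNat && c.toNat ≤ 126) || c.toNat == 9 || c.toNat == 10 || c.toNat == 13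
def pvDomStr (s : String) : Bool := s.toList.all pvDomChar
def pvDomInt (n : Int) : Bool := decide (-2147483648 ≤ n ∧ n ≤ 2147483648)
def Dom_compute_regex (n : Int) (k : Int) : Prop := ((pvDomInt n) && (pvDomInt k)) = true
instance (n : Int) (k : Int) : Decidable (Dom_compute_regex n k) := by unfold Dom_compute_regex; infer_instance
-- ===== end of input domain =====

-- B replaces A's (k+1)-way branching recursion on (n,k) by a row recursion on the size only
-- (row m = all regexes of size m for j=0..k, built from the two child rows): a different algorithm, same values.


-- ===== PORT A =====
-- the recursion works on List Char (PySem string domain); the entry wraps with String.ofList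
def computeRegexCoreA (n : Int) (k : Int) : List Char :=
  if k = 0 then PySem.List.pyRepeat ['0'] n                     -- n * "0"
  else if n = k then PySem.List.pyRepeat ['1'] n                -- n * "1"
  else if _hlt : n < k then []
  else
    -- int(math.floor(n / 2.0)) = n // 2 and int(math.ceil(n / 2.0)) = -((-n) // 2): exact for |n| ≤ 2^31
    let left_subregex_n := PySem.Int.floordiv n 2
    let right_subregex_n := -(PySem.Int.floordiv (-n) 2)
    let st := (PySem.List.pyRange 0 (k + 1) 1).attach.foldl
      (fun (st : List Char × Int) i =>
        let left_subregex := computeRegexCoreA left_subregex_n i.1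
        let right_subregex := computeRegexCoreA right_subregex_n (k - i.1)
        if left_subregex ≠ [] ∧ right_subregex ≠ [] then
          let merged := left_subregex ++ right_subregex
          let merged := if st.2 > 0 then '+' :: merged else merged
          (st.1 ++ merged, st.2 + 1)
        else st) ([], 0)
    if st.2 > 1 then '(' :: st.1 ++ [')'] else st.1
termination_by n.toNat
decreasing_by
  · have hi := PySem.List.mem_pyRange_one.mp i.2
    have h2 := PySem.Int.floordiv_eq_ediv_of_pos (a := n) (b := 2) (by omega)
    simp only [h2]; omega
  · have hi := PySem.List.mem_pyRange_one.mp i.2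
    have h2 := PySem.Int.floordiv_eq_ediv_of_pos (a := -n) (b := 2) (by omega)
    simp only [h2]; omega

def compute_regex (n : Int) (k : Int) : String := String.ofList (computeRegexCoreA n k)

-- ===== PORT B =====
-- row k m = [compute_regex(m, j) for j in range(k+1)] built from the two child rows (Source B's `row`)
def computeRegexRowB (k : Int) (m : Int) : List (List Char) :=
  if _h1 : m ≤ 1 then
    (PySem.List.pyRange 0 (k + 1) 1).map (fun j =>
      if j = 0 then PySem.List.pyRepeat ['0'] m
      else if j = m then PySem.List.pyRepeat ['1'] m
      else [])
  else
    let L := computeRegexRowB k (PySem.Int.floordiv m 2)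
    let R := computeRegexRowB k (PySem.Int.floordiv (m + 1) 2)
    (PySem.List.pyRange 0 (k + 1) 1).map (fun j =>
      if j = 0 then PySem.List.pyRepeat ['0'] m
      else if j = m then PySem.List.pyRepeat ['1'] m
      else if j > m then []
      else
        let parts := ((PySem.List.pyRange 0 (j + 1) 1).filter (fun i =>
            PySem.List.pyGetD L i [] ≠ [] ∧ PySem.List.pyGetD R (j - i) [] ≠ [])).map
          (fun i => PySem.List.pyGetD L i [] ++ PySem.List.pyGetD R (j - i) [])
        let s := PySem.Chars.join ['+'] parts
        if parts.length > 1 then '(' :: s ++ [')'] else s)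
termination_by m.toNat
decreasing_by
  · have h2 := PySem.Int.floordiv_eq_ediv_of_pos (a := m) (b := 2) (by omega)
    simp only [h2]; omega
  · have h2 := PySem.Int.floordiv_eq_ediv_of_pos (a := m + 1) (b := 2) (by omega)
    simp only [h2]; omega

def compute_regex_alt (n : Int) (k : Int) : String :=
  if k = 0 then String.ofList (PySem.List.pyRepeat ['0'] n)
  else if n = k then String.ofList (PySem.List.pyRepeat ['1'] n)
  else if n < k ∨ k < 0 then ""
  else String.ofList (PySem.List.pyGetD (computeRegexRowB k n) k [])

-- ===== PRECONDITION & SPEC =====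
def Spec_compute_regex (n : Int) (k : Int) (out : String) : Prop := out = compute_regex_alt n k
instance (n : Int) (k : Int) (out : String) : Decidable (Spec_compute_regex n k out) := by unfold Spec_compute_regex; infer_instance

-- ===== CLAIM (what is proved, stated in full; the proofs are below) =====
def Claim_equal_compute_regex : Prop := ∀ (n : Int) (k : Int), Dom_compute_regex n k → Spec_compute_regex n k (compute_regex n k)

-- ===== LEMMAS AND PROOFS =====

theorem join_plus_append (acc : List (List Char)) (x : List Char) :
    PySem.Chars.join ['+'] (acc ++ [x]) = if acc.isEmpty then x else PySem.Chars.join ['+'] acc ++ '+' :: x := by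
  induction acc with
  | nil => simp [PySem.Chars.join_singleton]
  | cons a as ih =>
    cases as with
    | nil => simp [PySem.Chars.join_cons_cons, PySem.Chars.join_singleton]
    | cons b bs => simp [PySem.Chars.join_cons_cons] at ih ⊢; simp [ih]

theorem foldA (f g : Int → List Char) (is : List Int) (acc : List (List Char)) :
    is.foldl (fun (st : List Char × Int) i =>
        if f i ≠ [] ∧ g i ≠ [] then
          (st.1 ++ (if st.2 > 0 then '+' :: (f i ++ g i) else f i ++ g i), st.2 + 1)
        else st)
      (PySem.Chars.join ['+'] acc, (acc.length : Int))
    = (PySem.Chars.join ['+'] (acc ++ (is.filter (fun i => decide (f i ≠ [] ∧ g i ≠ []))).map (fun i => f i ++ g i)),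
       ((acc.length : Int) + ((is.filter (fun i => decide (f i ≠ [] ∧ g i ≠ []))).length : Int))) := by
  induction is generalizing acc with
  | nil => simp
  | cons i is ih =>
    by_cases h : f i ≠ [] ∧ g i ≠ []
    · have hstep : (if f i ≠ [] ∧ g i ≠ [] then
          ((PySem.Chars.join ['+'] acc) ++ (if (acc.length : Int) > 0 then '+' :: (f i ++ g i) else f i ++ g i), (acc.length : Int) + 1)
        else (PySem.Chars.join ['+'] acc, (acc.length : Int)))
        = (PySem.Chars.join ['+'] (acc ++ [f i ++ g i]), ((acc ++ [f i ++ g i]).length : Int)) := by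
        rw [if_pos h, join_plus_append]
        cases acc <;> simp
      simp only [List.foldl_cons, hstep]
      rw [ih (acc ++ [f i ++ g i])]
      simp [h]
      omega
    · simp only [List.foldl_cons, if_neg h]
      rw [ih acc]
      simp [h]

theorem foldA0 (f g : Int → List Char) (is : List Int) :
    is.foldl (fun (st : List Char × Int) i =>
        if f i ≠ [] ∧ g i ≠ [] then
          (st.1 ++ (if st.2 > 0 then '+' :: (f i ++ g i) else f i ++ g i), st.2 + 1)
        else st) ([], 0)
    = (PySem.Chars.join ['+'] ((is.filter (fun i => decide (f i ≠ [] ∧ g i ≠ []))).map (fun i => f i ++ g i)),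
       (((is.filter (fun i => decide (f i ≠ [] ∧ g i ≠ []))).length : Int))) := by
  have h := foldA f g is []
  simpa using h

theorem ceil_half (m : Int) : -(PySem.Int.floordiv (-m) 2) = PySem.Int.floordiv (m + 1) 2 := by
  rw [PySem.Int.floordiv_eq_ediv_of_pos (by omega), PySem.Int.floordiv_eq_ediv_of_pos (by omega)]
  omega

theorem half_bounds (m : Int) (hm : 2 ≤ m) :
    1 ≤ PySem.Int.floordiv m 2 ∧ PySem.Int.floordiv m 2 < m ∧
    1 ≤ PySem.Int.floordiv (m + 1) 2 ∧ PySem.Int.floordiv (m + 1) 2 < m := by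
  rw [PySem.Int.floordiv_eq_ediv_of_pos (by omega), PySem.Int.floordiv_eq_ediv_of_pos (by omega)]
  omega

theorem row_spec (k : Int) :
    ∀ (N : Nat) (m : Int), m.toNat ≤ N → 1 ≤ m →
    computeRegexRowB k m = (PySem.List.pyRange 0 (k + 1) 1).map (fun j => computeRegexCoreA m j) := by
  intro N
  induction N with
  | zero => intro m h h1; omega
  | succ N ih =>
    intro m hN hm
    by_cases h1 : m ≤ 1
    · have hm1 : m = 1 := by omega
      subst hm1
      rw [computeRegexRowB, dif_pos (by omega)]
      apply List.map_congr_left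
      intro j hj
      have hj' := PySem.List.mem_pyRange_one.mp hj
      rw [computeRegexCoreA]
      by_cases hj0 : j = 0
      · simp [hj0]
      · by_cases hj1 : j = 1
        · simp [hj1]
        · simp [hj0, hj1, (by omega : (1:Int) < j)]
          omega
    · have hhalf := half_bounds m (by omega)
      have hL := ih (PySem.Int.floordiv m 2) (by omega) (by omega)
      have hR := ih (PySem.Int.floordiv (m + 1) 2) (by omega) (by omega)
      rw [computeRegexRowB, dif_neg h1]
      simp only [hL, hR]
      apply List.map_congr_left
      intro j hj
      have hj' := PySem.List.mem_pyRange_one.mp hj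
      by_cases hj0 : j = 0
      · rw [computeRegexCoreA]; simp [hj0]
      · by_cases hjm : j = m
        · rw [computeRegexCoreA]; simp [hjm]
        · by_cases hjgt : j > m
          · rw [if_neg hj0, if_neg (by omega : ¬ j = m), if_pos hjgt]
            rw [computeRegexCoreA, if_neg hj0, if_neg (by omega : ¬ m = j), dif_pos (by omega : m < j)]
          · -- 1 ≤ j < m : the real case
            rw [if_neg hj0, if_neg hjm, if_neg hjgt]
            rw [computeRegexCoreA]
            rw [if_neg hj0, if_neg (by omega : ¬ m = j), dif_neg (by omega : ¬ m < j)]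
            simp only [ceil_half]
            rw [List.foldl_attach (l := PySem.List.pyRange 0 (j + 1) 1)
              (f := (fun (st : List Char × Int) i =>
                if computeRegexCoreA (PySem.Int.floordiv m 2) i ≠ [] ∧ computeRegexCoreA (PySem.Int.floordiv (m + 1) 2) (j - i) ≠ [] then
                  (st.1 ++
                    if st.2 > 0 then
                      '+' :: (computeRegexCoreA (PySem.Int.floordiv m 2) i ++ computeRegexCoreA (PySem.Int.floordiv (m + 1) 2) (j - i))
                    else computeRegexCoreA (PySem.Int.floordiv m 2) i ++ computeRegexCoreA (PySem.Int.floordiv (m + 1) 2) (j - i),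
                    st.2 + 1)
                else st)) (b := (([] : List Char), (0 : Int)))]
            rw [foldA0 (fun i => computeRegexCoreA (PySem.Int.floordiv m 2) i)
              (fun i => computeRegexCoreA (PySem.Int.floordiv (m + 1) 2) (j - i))
              (PySem.List.pyRange 0 (j + 1) 1)]
            have hgl : ∀ i ∈ PySem.List.pyRange 0 (j + 1) 1,
                PySem.List.pyGetD ((PySem.List.pyRange 0 (k + 1) 1).map
                  (fun j => computeRegexCoreA (PySem.Int.floordiv m 2) j)) i []
                = computeRegexCoreA (PySem.Int.floordiv m 2) i := by
              intro i hi
              have hi' := PySem.List.mem_pyRange_one.mp hi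
              exact PySem.List.pyGetD_map_pyRange_of_nonneg _ _ _ _ (by omega) (by omega)
            have hgr : ∀ i ∈ PySem.List.pyRange 0 (j + 1) 1,
                PySem.List.pyGetD ((PySem.List.pyRange 0 (k + 1) 1).map
                  (fun j => computeRegexCoreA (PySem.Int.floordiv (m + 1) 2) j)) (j - i) []
                = computeRegexCoreA (PySem.Int.floordiv (m + 1) 2) (j - i) := by
              intro i hi
              have hi' := PySem.List.mem_pyRange_one.mp hi
              exact PySem.List.pyGetD_map_pyRange_of_nonneg _ _ _ _ (by omega) (by omega)
            have hfilter : (PySem.List.pyRange 0 (j + 1) 1).filter (fun i =>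
                  decide (PySem.List.pyGetD ((PySem.List.pyRange 0 (k + 1) 1).map
                      (fun j => computeRegexCoreA (PySem.Int.floordiv m 2) j)) i [] ≠ [] ∧
                    PySem.List.pyGetD ((PySem.List.pyRange 0 (k + 1) 1).map
                      (fun j => computeRegexCoreA (PySem.Int.floordiv (m + 1) 2) j)) (j - i) [] ≠ []))
                = (PySem.List.pyRange 0 (j + 1) 1).filter (fun i =>
                  decide (computeRegexCoreA (PySem.Int.floordiv m 2) i ≠ [] ∧
                    computeRegexCoreA (PySem.Int.floordiv (m + 1) 2) (j - i) ≠ [])) := by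
              apply List.filter_congr
              intro i hi
              rw [hgl i hi, hgr i hi]
            have hparts : (((PySem.List.pyRange 0 (j + 1) 1).filter (fun i =>
                  decide (PySem.List.pyGetD ((PySem.List.pyRange 0 (k + 1) 1).map
                      (fun j => computeRegexCoreA (PySem.Int.floordiv m 2) j)) i [] ≠ [] ∧
                    PySem.List.pyGetD ((PySem.List.pyRange 0 (k + 1) 1).map
                      (fun j => computeRegexCoreA (PySem.Int.floordiv (m + 1) 2) j)) (j - i) [] ≠ []))).map
                  (fun i => PySem.List.pyGetD ((PySem.List.pyRange 0 (k + 1) 1).map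
                      (fun j => computeRegexCoreA (PySem.Int.floordiv m 2) j)) i [] ++
                    PySem.List.pyGetD ((PySem.List.pyRange 0 (k + 1) 1).map
                      (fun j => computeRegexCoreA (PySem.Int.floordiv (m + 1) 2) j)) (j - i) []))
                = (((PySem.List.pyRange 0 (j + 1) 1).filter (fun i =>
                  decide (computeRegexCoreA (PySem.Int.floordiv m 2) i ≠ [] ∧
                    computeRegexCoreA (PySem.Int.floordiv (m + 1) 2) (j - i) ≠ []))).map
                  (fun i => computeRegexCoreA (PySem.Int.floordiv m 2) i ++
                    computeRegexCoreA (PySem.Int.floordiv (m + 1) 2) (j - i))) := by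
              rw [hfilter]
              apply List.map_congr_left
              intro i hi
              have hi' := List.mem_filter.mp hi
              rw [hgl i hi'.1, hgr i hi'.1]
            rw [hparts]
            set parts := ((PySem.List.pyRange 0 (j + 1) 1).filter (fun i =>
                  decide (computeRegexCoreA (PySem.Int.floordiv m 2) i ≠ [] ∧
                    computeRegexCoreA (PySem.Int.floordiv (m + 1) 2) (j - i) ≠ []))).map
                  (fun i => computeRegexCoreA (PySem.Int.floordiv m 2) i ++
                    computeRegexCoreA (PySem.Int.floordiv (m + 1) 2) (j - i)) with hp
            simp only
            by_cases hlen : 1 < parts.length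
            · rw [if_pos hlen, if_pos (by rw [hp, List.length_map] at hlen; exact_mod_cast hlen)]
            · rw [if_neg hlen, if_neg (by rw [hp, List.length_map] at hlen; omega)]

theorem main_eq (n k : Int) : compute_regex n k = compute_regex_alt n k := by
  unfold compute_regex compute_regex_alt
  by_cases h0 : k = 0
  · rw [computeRegexCoreA]; simp [h0]
  · by_cases h1 : n = k
    · rw [computeRegexCoreA]; simp [h0, h1]
    · by_cases h2 : n < k
      · rw [computeRegexCoreA, if_neg h0, if_neg h1, dif_pos h2,
          if_neg h0, if_neg h1, if_pos (Or.inl h2)]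
      · by_cases h3 : k < 0
        · rw [computeRegexCoreA, if_neg h0, if_neg h1, dif_neg h2,
            if_neg h0, if_neg h1, if_pos (Or.inr h3)]
          rw [PySem.List.pyRange_one_eq_nil (by omega)]
          simp
        · rw [if_neg h0, if_neg h1, if_neg (by omega : ¬(n < k ∨ k < 0))]
          rw [row_spec k n.toNat n (le_refl _) (by omega)]
          rw [PySem.List.pyGetD_map_pyRange_of_nonneg _ _ _ _ (by omega) (by omega)]

-- ===== VERDICT (by name: the statement is the Claim_ definition above) =====
theorem compute_regex_spec : Claim_equal_compute_regex := fun n k _ => main_eq n k
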